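-- pv_equiv track=rewrite | github.com/zzhx1/vllm-ascend | vllm_ascend/distributed/kv_transfer/utils/utils.py | get_tp_rank_head_mapping
-- ===== SOURCE A (Python) =====
-- def get_tp_rank_head_mapping(num_key_value_heads: int, tp_size: int):
--     # Get the head_idx corresponding to the tp_rank, {tp_rank:[head_indx]}
--     mapping = {}
--     if tp_size <= num_key_value_heads:
--         if num_key_value_heads % tp_size != 0:
--             raise ValueError(f"Number of heads ({num_key_value_heads}) cannot be evenly divided by TP ({tp_size}).")
--
--         heads_per_rank = num_key_value_heads // tp_size
--
--         for rank in range(tp_size):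
--             start_idx = rank * heads_per_rank
--             end_idx = start_idx + heads_per_rank
--             mapping[rank] = list(range(start_idx, end_idx))
--     else:
--         if tp_size % num_key_value_heads != 0:
--             raise ValueError(f"Number of heads ({num_key_value_heads}) cannot be evenly divided by TP ({tp_size}).")
--         ranks_per_head = tp_size // num_key_value_heads
--         for rank in range(tp_size):
--             head_idx = rank // ranks_per_head
--             mapping[rank] = [head_idx]
--     return mapping
-- ===== SOURCE B (Python) =====
-- def get_tp_rank_head_mapping(num_key_value_heads: int, tp_size: int):
--     # Unified block-partition: one closed-form index pass covers both regimes.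
--     mn = min(tp_size, num_key_value_heads)
--     mx = max(tp_size, num_key_value_heads)
--     if mx % mn != 0:
--         raise ValueError(
--             f"Number of heads ({num_key_value_heads}) cannot be evenly divided by TP ({tp_size})."
--         )
--     mapping = {r: [] for r in range(tp_size)}
--     for i in range(mx):
--         mapping[i * tp_size // mx].append(i * num_key_value_heads // mx)
--     return mapping
-- ===== Notes on version B (the rewrite author's own statement) =====
-- stated objective: simpler
-- what changed: A single closed-form index loop (rank = i*tp_size//n, head = i*num_key_value_heads//n over n = max of the two) replaces A's two differently-shaped per-branch loops and both divisibility checks collapse into one min/max check.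
-- outside the precondition, e.g. on get_tp_rank_head_mapping(4, -2): A returns {}, B raises KeyError
import Mathlib
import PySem

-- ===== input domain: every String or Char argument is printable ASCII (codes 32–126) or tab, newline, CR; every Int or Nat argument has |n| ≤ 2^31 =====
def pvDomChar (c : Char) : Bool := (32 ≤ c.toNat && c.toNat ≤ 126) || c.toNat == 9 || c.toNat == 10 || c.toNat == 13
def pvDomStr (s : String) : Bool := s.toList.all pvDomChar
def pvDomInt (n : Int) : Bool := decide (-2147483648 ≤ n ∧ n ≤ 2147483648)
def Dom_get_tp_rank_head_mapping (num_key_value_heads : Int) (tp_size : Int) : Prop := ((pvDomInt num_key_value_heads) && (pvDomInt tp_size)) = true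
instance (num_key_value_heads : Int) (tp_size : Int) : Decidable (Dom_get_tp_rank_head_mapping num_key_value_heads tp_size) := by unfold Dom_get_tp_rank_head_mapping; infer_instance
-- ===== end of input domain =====

-- B replaces A's two differently-shaped per-branch loops by one unified closed-form
-- block-partition pass (rank = i*tp//n, head = i*heads//n over n = max); objective: simpler.


-- ===== PORT A =====
-- the two 'raise ValueError' sites return [] here; those inputs are excluded by Pre_
def get_tp_rank_head_mapping (num_key_value_heads : Int) (tp_size : Int) : List (Int × List Int) :=
  if tp_size ≤ num_key_value_heads then
    if PySem.Int.mod num_key_value_heads tp_size ≠ 0 then []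
    else
      let heads_per_rank := PySem.Int.floordiv num_key_value_heads tp_size
      ((PySem.List.pyRange 0 tp_size 1).foldl (fun mapping rank =>
          mapping.insert rank
            (PySem.List.pyRange (rank * heads_per_rank) (rank * heads_per_rank + heads_per_rank) 1))
        PySem.Dict.empty).items
  else
    if PySem.Int.mod tp_size num_key_value_heads ≠ 0 then []
    else
      let ranks_per_head := PySem.Int.floordiv tp_size num_key_value_heads
      ((PySem.List.pyRange 0 tp_size 1).foldl (fun mapping rank =>
          mapping.insert rank [PySem.Int.floordiv rank ranks_per_head])
        PySem.Dict.empty).items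

-- ===== PORT B =====
-- 'raise ValueError' returns []; 'mapping[k].append(v)' raises KeyError on a missing key,
-- Dict.modify is exact whenever the key is present, which holds on every input in Pre_
def get_tp_rank_head_mapping_alt (num_key_value_heads : Int) (tp_size : Int) : List (Int × List Int) :=
  let mn := min tp_size num_key_value_heads
  let mx := max tp_size num_key_value_heads
  if PySem.Int.mod mx mn ≠ 0 then []
  else
    let m0 := (PySem.List.pyRange 0 tp_size 1).foldl
      (fun mapping r => mapping.insert r ([] : List Int)) PySem.Dict.empty
    ((PySem.List.pyRange 0 mx 1).foldl (fun mapping i =>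
        mapping.modify (PySem.Int.floordiv (i * tp_size) mx) []
          (fun l => l ++ [PySem.Int.floordiv (i * num_key_value_heads) mx])) m0).items

-- ===== PRECONDITION & SPEC =====
-- Pre_ admits exactly the inputs where A returns AND B returns: it excludes A's raises
-- (non-divisible pairs: ValueError; a zero divisor: ZeroDivisionError) and additionally the
-- inputs with 0 < num_key_value_heads ∧ tp_size < 0, where A's {} is an accident of iterating
-- an empty range while B's unified loop itself raises KeyError.
def Pre_get_tp_rank_head_mapping (num_key_value_heads : Int) (tp_size : Int) : Prop :=
  (tp_size ≤ num_key_value_heads → tp_size ≠ 0 ∧ tp_size ∣ num_key_value_heads) ∧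
  (num_key_value_heads < tp_size → num_key_value_heads ≠ 0 ∧ num_key_value_heads ∣ tp_size) ∧
  ¬(0 < num_key_value_heads ∧ tp_size < 0)
instance (num_key_value_heads : Int) (tp_size : Int) : Decidable (Pre_get_tp_rank_head_mapping num_key_value_heads tp_size) := by unfold Pre_get_tp_rank_head_mapping; infer_instance

def pvWitness_get_tp_rank_head_mapping : Int × Int := (8, 2)

def Spec_get_tp_rank_head_mapping (num_key_value_heads : Int) (tp_size : Int) (out : List (Int × List Int)) : Prop := out = get_tp_rank_head_mapping_alt num_key_value_heads tp_size
instance (num_key_value_heads : Int) (tp_size : Int) (out : List (Int × List Int)) : Decidable (Spec_get_tp_rank_head_mapping num_key_value_heads tp_size out) := by unfold Spec_get_tp_rank_head_mapping; infer_instance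

-- ===== CLAIM (what is proved, stated in full; the proofs are below) =====
def Claim_equal_get_tp_rank_head_mapping : Prop := ∀ (num_key_value_heads : Int) (tp_size : Int), Dom_get_tp_rank_head_mapping num_key_value_heads tp_size → Pre_get_tp_rank_head_mapping num_key_value_heads tp_size → Spec_get_tp_rank_head_mapping num_key_value_heads tp_size (get_tp_rank_head_mapping num_key_value_heads tp_size)

-- ===== LEMMAS AND PROOFS =====

lemma pv_B_items (tp mx : Int) (key val : Int → Int)
    (hkey : ∀ i ∈ PySem.List.pyRange 0 mx 1, key i ∈ PySem.List.pyRange 0 tp 1) :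
    ((PySem.List.pyRange 0 mx 1).foldl (fun m i =>
        m.modify (key i) [] (fun l => l ++ [val i]))
      ((PySem.List.pyRange 0 tp 1).foldl (fun m r => m.insert r ([] : List Int)) PySem.Dict.empty)).items
    = (PySem.List.pyRange 0 tp 1).map
        (fun r => (r, ((PySem.List.pyRange 0 mx 1).filter (fun i => key i == r)).map val)) := by
  set R := PySem.List.pyRange 0 tp 1 with hR
  set L := PySem.List.pyRange 0 mx 1 with hL
  set m0 := R.foldl (fun m r => m.insert r ([] : List Int)) PySem.Dict.empty with hm0
  have hnR : R.Nodup := PySem.List.nodup_pyRange_one 0 tp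
  have hm0items : m0.items = R.map (fun r => (r, ([] : List Int))) := by
    have := PySem.Dict.items_foldl_insert_fresh R (fun r => r) (fun _ => ([] : List Int))
      PySem.Dict.empty (fun a _ => PySem.Dict.contains_empty a) (by simpa using hnR)
    simpa using this
  have hm0keys : m0.keys = R := by
    simp only [PySem.Dict.keys, hm0items, List.map_map]
    exact List.map_id R
  have hnk0 : m0.keys.Nodup := by rw [hm0keys]; exact hnR
  set d1 := L.foldl (fun m i => m.modify (key i) [] (fun l => l ++ [val i])) m0 with hd1
  have hkeys1 : d1.keys = R := by
    rw [hd1, PySem.Dict.keys_foldl_modify_key L key ([] : List Int) (fun _ i l => l ++ [val i]) m0,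
        hm0keys, PySem.Set.update_eq_append_filter]
    have : (PySem.Set.ofList (L.map key)).filter (fun y => !(PySem.Set.contains R y)) = [] := by
      apply List.filter_eq_nil_iff.mpr
      intro y hy
      have hyR : y ∈ R := by
        rcases List.mem_map.mp ((PySem.Set.mem_ofList _ _).mp hy) with ⟨i, hi, rfl⟩
        exact hkey i hi
      simp [PySem.Set.contains, hyR]
    rw [this, List.append_nil]
  have hnk1 : d1.keys.Nodup := by
    rw [hd1]; exact PySem.Dict.nodup_keys_foldl_modify_key L key _ _ m0 hnk0
  have hpair : d1 = (L.map (fun i => (key i, val i))).foldl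
      (fun d p => d.modify p.1 [] (fun x => x ++ [p.2])) m0 := by
    rw [List.foldl_map]
  have hitems := PySem.Dict.items_eq_map_keys d1 hnk1 ([] : List Int)
  rw [hitems, hkeys1]
  apply List.map_congr_left
  intro r hr
  have hgetD : d1.getD r [] = ((L.filter (fun i => key i == r)).map val) := by
    rw [hpair, PySem.Dict.getD_foldl_modify_append]
    have hmem : (r, ([] : List Int)) ∈ m0.items := by
      rw [hm0items]; exact List.mem_map_of_mem hr
    have hm0getD : m0.getD r [] = [] := PySem.Dict.getD_of_mem_items m0 hmem hnk0 []
    rw [hm0getD, List.nil_append, List.filter_map, List.map_map]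
    rfl
  rw [hgetD]

lemma pv_fdiv_scale' (a b c : Int) (hb : 0 < b) (hc : 0 < c) :
    PySem.Int.floordiv (a * c) (b * c) = PySem.Int.floordiv a b := by
  have h := (PySem.Int.floordiv_eq_iff_of_pos hb (q := PySem.Int.floordiv a b)).mp rfl
  exact (PySem.Int.floordiv_eq_iff_of_pos (mul_pos hb hc)).mpr
    ⟨by nlinarith [h.1], by nlinarith [h.2]⟩

lemma pv_fdiv_mul_cancel' (a c : Int) (hc : c ≠ 0) :
    PySem.Int.floordiv (a * c) c = a := by
  have hone : ∀ x : Int, PySem.Int.floordiv x 1 = x := fun x =>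
    (PySem.Int.floordiv_eq_iff_of_pos one_pos).mpr ⟨by omega, by omega⟩
  rcases lt_or_gt_of_ne hc with h | h
  · have := pv_fdiv_scale' a 1 (-c) one_pos (by omega)
    rw [one_mul, hone] at this
    calc PySem.Int.floordiv (a * c) c
        = PySem.Int.floordiv (-(a * c)) (-c) := (PySem.Int.floordiv_neg_neg _ _).symm
      _ = PySem.Int.floordiv (a * (-c)) (-c) := by ring_nf
      _ = a := this
  · have := pv_fdiv_scale' a 1 c one_pos h
    rwa [one_mul, hone] at this

lemma pv_case1 (num tp r : Int) (htp : 0 < tp) (hdvd : tp ∣ num) (htn : tp ≤ num)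
    (hr : r ∈ PySem.List.pyRange 0 tp 1) :
    ((PySem.List.pyRange 0 num 1).filter (fun i => PySem.Int.floordiv (i * tp) num == r)).map
        (fun i => PySem.Int.floordiv (i * num) num)
    = PySem.List.pyRange (r * PySem.Int.floordiv num tp)
        (r * PySem.Int.floordiv num tp + PySem.Int.floordiv num tp) 1 := by
  obtain ⟨h, rfl⟩ := hdvd
  have hfd : PySem.Int.floordiv (tp * h) tp = h := by
    rw [mul_comm]; exact pv_fdiv_mul_cancel' h tp (by omega)
  rw [hfd]
  have hh : 0 < h := by nlinarith
  have hnum : 0 < tp * h := by positivity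
  obtain ⟨hr0, hrt⟩ := PySem.List.mem_pyRange_one.mp hr
  have hpred : ∀ i : Int, (PySem.Int.floordiv (i * tp) (tp * h) == r) = decide (r * h ≤ i ∧ i < r * h + h) := by
    intro i
    rcases Classical.em (r * h ≤ i ∧ i < r * h + h) with hc | hc
    · have : PySem.Int.floordiv (i * tp) (tp * h) = r :=
        (PySem.Int.floordiv_eq_iff_of_pos hnum).mpr ⟨by nlinarith [hc.1], by nlinarith [hc.2]⟩
      simp [this, hc]
    · have : PySem.Int.floordiv (i * tp) (tp * h) ≠ r := by
        intro he
        have := (PySem.Int.floordiv_eq_iff_of_pos hnum).mp he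
        exact hc ⟨by nlinarith [this.1], by nlinarith [this.2]⟩
      simp [this, hc]
    -- ranges split
  have hsplit : PySem.List.pyRange 0 (tp * h) 1
      = PySem.List.pyRange 0 (r * h) 1 ++ PySem.List.pyRange (r * h) (r * h + h) 1
        ++ PySem.List.pyRange (r * h + h) (tp * h) 1 := by
    rw [List.append_assoc, ← PySem.List.pyRange_one_append (r * h) (r * h + h) (tp * h) (by omega) (by nlinarith),
        ← PySem.List.pyRange_one_append 0 (r * h) (tp * h) (by positivity) (by nlinarith)]
  rw [hsplit]
  simp only [List.filter_append]
  have h1 : (PySem.List.pyRange 0 (r * h) 1).filter (fun i => PySem.Int.floordiv (i * tp) (tp * h) == r) = [] := by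
    apply List.filter_eq_nil_iff.mpr
    intro i hi
    obtain ⟨hi0, hi1⟩ := PySem.List.mem_pyRange_one.mp hi
    rw [hpred]; simp; omega
  have h2 : (PySem.List.pyRange (r * h) (r * h + h) 1).filter (fun i => PySem.Int.floordiv (i * tp) (tp * h) == r)
      = PySem.List.pyRange (r * h) (r * h + h) 1 := by
    apply List.filter_eq_self.mpr
    intro i hi
    obtain ⟨hi0, hi1⟩ := PySem.List.mem_pyRange_one.mp hi
    rw [hpred]; simp; omega
  have h3 : (PySem.List.pyRange (r * h + h) (tp * h) 1).filter (fun i => PySem.Int.floordiv (i * tp) (tp * h) == r) = [] := by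
    apply List.filter_eq_nil_iff.mpr
    intro i hi
    obtain ⟨hi0, hi1⟩ := PySem.List.mem_pyRange_one.mp hi
    rw [hpred]; simp; omega
  rw [h1, h2, h3, List.nil_append, List.append_nil]
  apply List.map_congr_left (fun i _ => pv_fdiv_mul_cancel' i (tp * h) (by omega)) |>.trans
  exact List.map_id _

lemma pv_case2 (num tp r : Int) (htp : 0 < tp) (hn0 : num ≠ 0) (hdvd : num ∣ tp)
    (hr : r ∈ PySem.List.pyRange 0 tp 1) :
    ((PySem.List.pyRange 0 tp 1).filter (fun i => PySem.Int.floordiv (i * tp) tp == r)).map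
        (fun i => PySem.Int.floordiv (i * num) tp)
    = [PySem.Int.floordiv r (PySem.Int.floordiv tp num)] := by
  obtain ⟨hr0, hrt⟩ := PySem.List.mem_pyRange_one.mp hr
  have hfilter : (PySem.List.pyRange 0 tp 1).filter (fun i => PySem.Int.floordiv (i * tp) tp == r) = [r] := by
    have hsplit : PySem.List.pyRange 0 tp 1
        = PySem.List.pyRange 0 r 1 ++ PySem.List.pyRange r (r + 1) 1 ++ PySem.List.pyRange (r + 1) tp 1 := by
      rw [List.append_assoc, ← PySem.List.pyRange_one_append r (r + 1) tp (by omega) (by omega),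
          ← PySem.List.pyRange_one_append 0 r tp (by omega) (by omega)]
    have hcancel : ∀ i : Int, PySem.Int.floordiv (i * tp) tp = i :=
      fun i => pv_fdiv_mul_cancel' i tp (by omega)
    rw [hsplit]
    simp only [List.filter_append]
    have h1 : (PySem.List.pyRange 0 r 1).filter (fun i => PySem.Int.floordiv (i * tp) tp == r) = [] := by
      apply List.filter_eq_nil_iff.mpr
      intro i hi
      obtain ⟨hi0, hi1⟩ := PySem.List.mem_pyRange_one.mp hi
      rw [hcancel]; simp; omega
    have h3 : (PySem.List.pyRange (r + 1) tp 1).filter (fun i => PySem.Int.floordiv (i * tp) tp == r) = [] := by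
      apply List.filter_eq_nil_iff.mpr
      intro i hi
      obtain ⟨hi0, hi1⟩ := PySem.List.mem_pyRange_one.mp hi
      rw [hcancel]; simp; omega
    have hmid : PySem.List.pyRange r (r + 1) 1 = [r] := by
      rw [PySem.List.pyRange_one_cons (by omega)]
      rw [PySem.List.pyRange_one]
      simp
    rw [h1, h3, hmid]
    simp [hcancel]
  rw [hfilter]
  simp only [List.map_cons, List.map_nil]
  congr 1
  obtain ⟨k, rfl⟩ := hdvd
  have hfd : PySem.Int.floordiv (num * k) num = k := by
    rw [mul_comm]; exact pv_fdiv_mul_cancel' k num hn0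
  rw [hfd]
  rcases lt_or_gt_of_ne hn0 with hneg | hpos
  · have hk : k < 0 := by nlinarith
    calc PySem.Int.floordiv (r * num) (num * k)
        = PySem.Int.floordiv ((-r) * (-num)) ((-k) * (-num)) := by ring_nf
      _ = PySem.Int.floordiv (-r) (-k) := pv_fdiv_scale' (-r) (-k) (-num) (by omega) (by omega)
      _ = PySem.Int.floordiv r k := PySem.Int.floordiv_neg_neg r k
  · have hk : 0 < k := by nlinarith
    calc PySem.Int.floordiv (r * num) (num * k)
        = PySem.Int.floordiv (r * num) (k * num) := by ring_nf
      _ = PySem.Int.floordiv r k := pv_fdiv_scale' r k num hk hpos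

lemma pv_empty_range (t : Int) (ht : t ≤ 0) : PySem.List.pyRange 0 t 1 = [] := by
  have h0 : (t - 0).toNat = 0 := by omega
  rw [PySem.List.pyRange_one, h0]
  simp

lemma pv_A_items (R : List Int) (hnR : R.Nodup) (v : Int → List Int) :
    (R.foldl (fun m r => m.insert r (v r)) (PySem.Dict.empty : PySem.Dict Int (List Int))).items
    = R.map (fun r => (r, v r)) := by
  have := PySem.Dict.items_foldl_insert_fresh R (fun r => r) v
    PySem.Dict.empty (fun a _ => PySem.Dict.contains_empty a) (by simpa using hnR)
  simpa using this

-- ===== VERDICT (by name: the statement is the Claim_ definition above) =====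
theorem get_tp_rank_head_mapping_spec : Claim_equal_get_tp_rank_head_mapping := by
  unfold Claim_equal_get_tp_rank_head_mapping
  intro n t _ hpre
  obtain ⟨h1, h2, h3⟩ := hpre
  unfold Spec_get_tp_rank_head_mapping get_tp_rank_head_mapping get_tp_rank_head_mapping_alt
  by_cases htn : t ≤ n
  · obtain ⟨ht0, hdvd⟩ := h1 htn
    have hmn : min t n = t := min_eq_left htn
    have hmx : max t n = n := max_eq_right htn
    have hmod : PySem.Int.mod n t = 0 := (PySem.Int.mod_eq_zero_iff_dvd n t).mpr hdvd
    simp only [hmn, hmx, if_pos htn, hmod, ne_eq, not_true_eq_false, if_false]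
    by_cases htpos : 0 < t
    · have hn : 0 < n := lt_of_lt_of_le htpos htn
      rw [pv_A_items _ (PySem.List.nodup_pyRange_one 0 t) _]
      rw [pv_B_items t n (fun i => PySem.Int.floordiv (i * t) n) (fun i => PySem.Int.floordiv (i * n) n) ?hkey]
      · apply List.map_congr_left
        intro r hr
        exact congrArg (Prod.mk r) (pv_case1 n t r htpos hdvd htn hr).symm
      case hkey =>
        intro i hi
        obtain ⟨hi0, hi1⟩ := PySem.List.mem_pyRange_one.mp hi
        refine PySem.List.mem_pyRange_one.mpr ⟨?_, ?_⟩
        · have := (PySem.Int.le_floordiv_iff_mul_le (a := i * t) (b := n) (q := 0) hn).mpr (by nlinarith)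
          simpa using this
        · exact (PySem.Int.floordiv_lt_iff_lt_mul (a := i * t) (b := n) (q := t) hn).mpr (by nlinarith)
    · have htneg : t < 0 := by omega
      have hnle : n ≤ 0 := by by_contra hc; exact h3 ⟨by omega, htneg⟩
      rw [pv_empty_range t (by omega), pv_empty_range n (by omega)]
      simp [PySem.Dict.empty]
  · rw [not_le] at htn
    obtain ⟨hn0, hdvd⟩ := h2 htn
    have hmn : min t n = n := min_eq_right (le_of_lt htn)
    have hmx : max t n = t := max_eq_left (le_of_lt htn)
    have hmod : PySem.Int.mod t n = 0 := (PySem.Int.mod_eq_zero_iff_dvd t n).mpr hdvd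
    simp only [hmn, hmx, if_neg (not_le.mpr htn), hmod, ne_eq, not_true_eq_false, if_false]
    by_cases htpos : 0 < t
    · rw [pv_A_items _ (PySem.List.nodup_pyRange_one 0 t) _]
      rw [pv_B_items t t (fun i => PySem.Int.floordiv (i * t) t) (fun i => PySem.Int.floordiv (i * n) t) ?hkey2]
      · apply List.map_congr_left
        intro r hr
        exact congrArg (Prod.mk r) (pv_case2 n t r htpos hn0 hdvd hr).symm
      case hkey2 =>
        intro i hi
        simp only [pv_fdiv_mul_cancel' i t (show t ≠ 0 by omega)]
        exact hi
    · rw [pv_empty_range t (by omega)]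
      simp [PySem.Dict.empty]
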